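-- pv_equiv track=rewrite | github.com/wdroberts/grant_tracker | validate_emails.py | is_suspicious_email
-- ===== SOURCE A (Python) =====
-- SUSPICIOUS_DOMAINS = [
--     'example.com', 'example.org', 'test.com', 'localhost',
--     'invalid', 'fake.com', 'test.org', 'example.net'
-- ]
--
-- def is_suspicious_email(email):
--     """
--     Check if email matches suspicious/test patterns.
--
--     Args:
--         email (str): Email address to check
--
--     Returns:
--         tuple: (is_suspicious, reason)
--     """
--     if not email or '@' not in email:
--         return False, ""
--
--     email_lower = email.lower().strip()
--     parts = email_lower.split('@')
--
--     if len(parts) != 2: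
--         return False, ""
--
--     local_part = parts[0]
--     domain_part = parts[1]
--
--     # Check for test domains
--     for test_domain in SUSPICIOUS_DOMAINS:
--         if domain_part == test_domain or domain_part.endswith('.' + test_domain):
--             return True, f"Test domain: {test_domain}"
--
--     # Check if local part equals domain part (e.g., test@test.com)
--     if local_part == domain_part.split('.')[0]:
--         return True, "Local part matches domain part"
--
--     # Check if both parts contain "test"
--     if 'test' in local_part and 'test' in domain_part:
--         return True, "Contains 'test' in both local and domain parts"
--
--     # Check for repeated patterns (e.g., abc@abc.com)
--     if local_part == domain_part.split('.')[0] and len(local_part) > 2: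
--         return True, "Repeated pattern detected"
--
--     return False, ""
-- ===== SOURCE B (Python) =====
-- SUSPICIOUS_DOMAINS = {
--     'example.com', 'example.org', 'test.com', 'localhost',
--     'invalid', 'fake.com', 'test.org', 'example.net'
-- }
--
--
-- def _matching_suffix(domain):
--     """Longest dot-delimited suffix of domain that is a listed domain, else None."""
--     suffix = domain
--     while True:
--         if suffix in SUSPICIOUS_DOMAINS:
--             return suffix
--         dot = suffix.find('.')
--         if dot == -1:
--             return None
--         suffix = suffix[dot + 1:]
--
--
-- def is_suspicious_email(email):
--     """
--     Check if email matches suspicious/test patterns.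
--
--     Returns:
--         tuple: (is_suspicious, reason)
--     """
--     if not email or '@' not in email:
--         return False, ""
--     email_lower = email.lower().strip()
--     parts = email_lower.split('@')
--     if len(parts) != 2:
--         return False, ""
--     local_part, domain_part = parts
--     hit = _matching_suffix(domain_part)
--     if hit is not None:
--         return True, f"Test domain: {hit}"
--     if local_part == domain_part.split('.')[0]:
--         return True, "Local part matches domain part"
--     if 'test' in local_part and 'test' in domain_part:
--         return True, "Contains 'test' in both local and domain parts"
--     return False, ""
-- ===== Notes on version B (the rewrite author's own statement) =====
-- stated objective: idiomatic
-- what changed: A scans the fixed SUSPICIOUS_DOMAINS list testing each listed domain for equality or dot-prefixed suffix match against the email's domain; B instead walks the email domain's own dot-delimited suffixes and tests each for membership in a precomputed set, and drops A's unreachable fourth check.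
import Mathlib
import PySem

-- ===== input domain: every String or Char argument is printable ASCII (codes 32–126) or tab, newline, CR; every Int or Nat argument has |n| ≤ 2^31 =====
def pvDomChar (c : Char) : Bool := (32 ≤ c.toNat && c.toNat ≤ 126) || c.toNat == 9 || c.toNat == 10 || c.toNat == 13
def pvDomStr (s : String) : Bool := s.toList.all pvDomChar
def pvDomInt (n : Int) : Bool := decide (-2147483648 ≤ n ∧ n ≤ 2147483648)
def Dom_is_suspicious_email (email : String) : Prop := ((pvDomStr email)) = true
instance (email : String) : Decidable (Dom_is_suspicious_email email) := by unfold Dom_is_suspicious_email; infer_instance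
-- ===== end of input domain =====

-- B replaces A's scan over the fixed SUSPICIOUS_DOMAINS list (equality / '.'+d suffix test per
-- listed domain) by a walk over the email domain's own dot-delimited suffixes tested against a
-- set; objective: idiomatic. B's tail checks drop A's unreachable fourth branch.

-- ===== PORT A =====
def pvSuspiciousDomains : List (List Char) :=
  ["example.com".toList, "example.org".toList, "test.com".toList, "localhost".toList,
   "invalid".toList, "fake.com".toList, "test.org".toList, "example.net".toList]

-- the 'for test_domain in SUSPICIOUS_DOMAINS' loop, returning the first listed hit
def pvAFind : List (List Char) → List Char → Option (List Char)
  | [], _ => none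
  | t :: ts, d =>
      if d = t ∨ PySem.Chars.endswith d ('.' :: t) then some t else pvAFind ts d

def is_suspicious_email (email : String) : Bool × String :=
  if email.toList = [] ∨ ¬ (PySem.Str.isIn "@" email) then (false, "")
  else
    let email_lower := PySem.Chars.strip (PySem.Chars.lower email.toList)
    let parts := PySem.Chars.splitOn email_lower "@".toList
    if parts.length ≠ 2 then (false, "")
    else
      let local_part := parts.getD 0 []
      let domain_part := parts.getD 1 []
      match pvAFind pvSuspiciousDomains domain_part with
      | some t => (true, String.ofList ("Test domain: ".toList ++ t))
      | none =>
        if local_part = (PySem.Chars.splitOn domain_part ['.']).getD 0 [] then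
          (true, "Local part matches domain part")
        else if PySem.Chars.isIn "test".toList local_part ∧ PySem.Chars.isIn "test".toList domain_part then
          (true, "Contains 'test' in both local and domain parts")
        else if local_part = (PySem.Chars.splitOn domain_part ['.']).getD 0 [] ∧ 2 < local_part.length then
          (true, "Repeated pattern detected")
        else (false, "")

-- ===== PORT B =====
def pvSuspiciousSet : PySem.Set (List Char) :=
  PySem.Set.ofList
    ["example.com".toList, "example.org".toList, "test.com".toList, "localhost".toList,
     "invalid".toList, "fake.com".toList, "test.org".toList, "example.net".toList]

-- termination measure for the suffix walk: suffix[dot+1:] is strictly shorter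
theorem pv_slice_len_lt (s : List Char) (h : ¬ PySem.Chars.find s ['.'] = -1) :
    (PySem.Chars.slice s (some (PySem.Chars.find s ['.'] + 1))).length < s.length := by
  have h0 : 0 ≤ PySem.Chars.find s ['.'] := by
    have := PySem.Chars.neg_one_le_find s ['.']
    omega
  have hs : s ≠ [] := by
    have hinf : ['.'] <:+: s := (PySem.Chars.find_ne_neg_one_iff s ['.']).mp h
    rintro rfl; simp at hinf
  rw [PySem.Chars.slice_eq_listSlice, PySem.List.slice_from _ (by omega)]
  rw [List.length_drop]
  have : 0 < s.length := List.length_pos_iff.mpr hs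
  omega

-- the 'while True' suffix walk of _matching_suffix
def pvMatchingSuffix (suffix : List Char) : Option (List Char) :=
  if PySem.Set.contains pvSuspiciousSet suffix then some suffix
  else
    if h : PySem.Chars.find suffix ['.'] = -1 then none
    else pvMatchingSuffix (PySem.Chars.slice suffix (some (PySem.Chars.find suffix ['.'] + 1)))
termination_by suffix.length
decreasing_by exact pv_slice_len_lt suffix h

def is_suspicious_email_alt (email : String) : Bool × String :=
  if email.toList = [] ∨ ¬ (PySem.Str.isIn "@" email) then (false, "")
  else
    let email_lower := PySem.Chars.strip (PySem.Chars.lower email.toList)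
    match PySem.Chars.splitOn email_lower "@".toList with
    | [local_part, domain_part] =>
      (match pvMatchingSuffix domain_part with
       | some hit => (true, String.ofList ("Test domain: ".toList ++ hit))
       | none =>
         if local_part = (PySem.Chars.splitOn domain_part ['.']).getD 0 [] then
           (true, "Local part matches domain part")
         else if PySem.Chars.isIn "test".toList local_part ∧ PySem.Chars.isIn "test".toList domain_part then
           (true, "Contains 'test' in both local and domain parts")
         else (false, ""))
    | _ => (false, "")

-- ===== PRECONDITION & SPEC =====
def Spec_is_suspicious_email (email : String) (out : Bool × String) : Prop := out = is_suspicious_email_alt email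
instance (email : String) (out : Bool × String) : Decidable (Spec_is_suspicious_email email out) := by unfold Spec_is_suspicious_email; infer_instance

-- ===== CLAIM (what is proved, stated in full; the proofs are below) =====
def Claim_equal_is_suspicious_email : Prop := ∀ (email : String), Dom_is_suspicious_email email → Spec_is_suspicious_email email (is_suspicious_email email)

-- ===== LEMMAS AND PROOFS =====

-- A's per-domain condition, as a proposition
abbrev pvCond (t d : List Char) : Prop := d = t ∨ ('.' :: t) <:+ d

theorem pvAFind_eq_find? (L : List (List Char)) (d : List Char) :
    pvAFind L d = L.find? (fun t => decide (pvCond t d)) := by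
  induction L with
  | nil => rfl
  | cons t ts ih =>
    rw [pvAFind, List.find?_cons]
    by_cases h : pvCond t d
    · have hb : (d = t ∨ PySem.Chars.endswith d ('.' :: t)) := by
        rcases h with h1 | h1
        · exact Or.inl h1
        · exact Or.inr ((PySem.Chars.endswith_iff d ('.' :: t)).mpr h1)
      simp [hb, h]
    · have hb : ¬ (d = t ∨ PySem.Chars.endswith d ('.' :: t)) := by
        rintro (h1 | h1)
        · exact h (Or.inl h1)
        · exact h (Or.inr ((PySem.Chars.endswith_iff d ('.' :: t)).mp h1))
      simp [hb, h, ih]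

theorem pvFind?_congr (p q : List Char → Bool) (L : List (List Char))
    (h : ∀ x ∈ L, p x = q x) : L.find? p = L.find? q := by
  induction L with
  | nil => rfl
  | cons t ts ih =>
    rw [List.find?_cons, List.find?_cons, h t (List.mem_cons_self), ih (fun x hx => h x (List.mem_cons_of_mem _ hx))]

theorem pvFind?_self (d : List Char) (L : List (List Char)) (hd : d ∈ L)
    (hu : ∀ t ∈ L, pvCond t d → t = d) :
    L.find? (fun t => decide (pvCond t d)) = some d := by
  induction L with
  | nil => simp at hd
  | cons t ts ih =>
    rw [List.find?_cons]
    by_cases h : pvCond t d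
    · simp only [h, decide_true]
      exact congrArg some (hu t List.mem_cons_self h)
    · simp only [h, decide_false]
      have hdt : d ≠ t := fun he => h (Or.inl he)
      have : d ∈ ts := by
        rcases List.mem_cons.mp hd with h1 | h1
        · exact absurd h1 hdt
        · exact h1
      exact ih this (fun t' ht' hc => hu t' (List.mem_cons_of_mem _ ht') hc)

-- no listed domain is a (string) suffix of another
theorem pv_no_two_suffix :
    ∀ t₁ ∈ pvSuspiciousDomains, ∀ t₂ ∈ pvSuspiciousDomains, t₁ <:+ t₂ → t₁ = t₂ := by
  decide

theorem pvCond_suffix {t d : List Char} (h : pvCond t d) : t <:+ d := by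
  rcases h with rfl | h
  · exact List.suffix_refl _
  · exact (List.suffix_cons '.' t).trans h

-- at most one listed domain can satisfy A's condition together with d itself being listed
theorem pvUnique (d : List Char) (hd : d ∈ pvSuspiciousDomains) :
    ∀ t ∈ pvSuspiciousDomains, pvCond t d → t = d :=
  fun t ht hc => pv_no_two_suffix t ht d hd (pvCond_suffix hc)

-- the crux: with a dot-free first label, '.'+t is a suffix of a ++ '.' :: r iff t is r or '.'+t is a suffix of r
theorem pv_dotSuffix_split (a r t : List Char) (ha : '.' ∉ a) :
    (('.' :: t) <:+ (a ++ '.' :: r)) ↔ (t = r ∨ ('.' :: t) <:+ r) := by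
  constructor
  · intro h
    rcases Nat.lt_trichotomy t.length r.length with hlt | heq | hgt
    · right
      have h2 : ('.' :: r) <:+ (a ++ '.' :: r) := List.suffix_append_of_suffix (List.suffix_refl _)
      have hsub : ('.' :: t) <:+ ('.' :: r) :=
        List.suffix_of_suffix_length_le h h2 (by simp; omega)
      rcases List.suffix_cons_iff.mp hsub with h3 | h3
      · exact absurd (congrArg List.length h3) (by simp; omega)
      · exact h3
    · left
      rcases h with ⟨p, hp⟩
      have hlen : p.length = a.length := by
        have := congrArg List.length hp
        simp at this
        omega
      obtain ⟨-, h2⟩ := List.append_inj hp hlen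
      injection h2
    · exfalso
      rcases h with ⟨p, hp⟩
      have hlen : p.length < a.length := by
        have := congrArg List.length hp
        simp at this
        omega
      have h1 : (p ++ '.' :: t)[p.length]? = some '.' := by
        rw [List.getElem?_append_right (le_refl _)]
        simp
      have h2 : (a ++ '.' :: r)[p.length]? = a[p.length]? := List.getElem?_append_left hlen
      rw [hp] at h1
      rw [h1] at h2
      exact ha (List.mem_of_getElem? h2.symm)
  · rintro (rfl | h)
    · exact ⟨a, rfl⟩
    · exact h.trans (((List.suffix_cons '.' r).trans (List.suffix_refl _)).trans
        (List.suffix_append_of_suffix (List.suffix_refl _)))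

theorem pvSet_eq : pvSuspiciousSet = pvSuspiciousDomains := by decide

theorem pvContains_iff (d : List Char) :
    PySem.Set.contains pvSuspiciousSet d = true ↔ d ∈ pvSuspiciousDomains := by
  rw [pvSet_eq]
  simp [PySem.Set.contains]

-- the main loop equivalence: A's scan over the listed domains finds exactly the suffix B's walk finds
theorem pvMain : ∀ (n : Nat) (d : List Char), d.length ≤ n →
    pvAFind pvSuspiciousDomains d = pvMatchingSuffix d := by
  intro n
  induction n with
  | zero =>
    intro d hd
    have hnil : d = [] := List.eq_nil_of_length_eq_zero (Nat.le_zero.mp hd)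
    subst hnil
    rw [pvMatchingSuffix]
    decide
  | succ n ih =>
    intro d hd
    rw [pvMatchingSuffix, pvAFind_eq_find?]
    by_cases hmem : PySem.Set.contains pvSuspiciousSet d = true
    · rw [if_pos hmem]
      exact pvFind?_self d _ ((pvContains_iff d).mp hmem) (pvUnique d ((pvContains_iff d).mp hmem))
    · rw [if_neg hmem]
      have hdnot : d ∉ pvSuspiciousDomains := fun h => hmem ((pvContains_iff d).mpr h)
      by_cases hdot : PySem.Chars.find d ['.'] = -1
      · rw [dif_pos hdot]
        rw [List.find?_eq_none]
        intro t ht hc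
        rcases of_decide_eq_true (by simpa using hc) with h1 | h1
        · subst h1
          exact hdnot ht
        · rcases h1 with ⟨p, hp⟩
          have hinf : ['.'] <:+: d := ⟨p, t, by rw [← hp]; simp⟩
          exact (PySem.Chars.find_eq_neg_one_iff d ['.']).mp hdot hinf
      · rw [dif_neg hdot]
        -- decompose d = a ++ '.' :: r at the first dot
        have h0 : 0 ≤ PySem.Chars.find d ['.'] := by
          have := PySem.Chars.neg_one_le_find d ['.']
          omega
        obtain ⟨hpre, hmin⟩ := PySem.Chars.find_spec (s := d) (sub := ['.']) h0
        set k := (PySem.Chars.find d ['.']).toNat with hk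
        have hklen : k < d.length := by
          rcases hpre with ⟨u, hu⟩
          have := congrArg List.length hu
          simp at this
          omega
        have hdk : d.drop k = '.' :: d.drop (k + 1) := by
          rcases hpre with ⟨u, hu⟩
          have hu' : d.drop k = '.' :: u := by simpa using hu.symm
          have h4 : u = d.drop (k + 1) := by
            have h3 := congrArg List.tail hu'
            simpa [List.tail_drop] using h3.symm
          rw [hu', h4]
        set r := d.drop (k + 1) with hr
        have hsplit : d = d.take k ++ '.' :: r := by
          conv_lhs => rw [← List.take_append_drop k d]
          rw [hdk]
        have hafree : '.' ∉ d.take k := by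
          intro hmemdot
          obtain ⟨j, hj, hget⟩ := List.mem_iff_getElem.mp hmemdot
          have hjk : j < k := by
            have := hj
            simp [List.length_take] at this
            omega
          apply hmin j hjk
          have hjlen : j < d.length := lt_trans hjk hklen
          rw [List.drop_eq_getElem_cons hjlen]
          have : d[j] = '.' := by
            have := hget
            rw [List.getElem_take] at this
            exact this
          rw [this]
          exact ⟨_, rfl⟩
        -- rewrite the recursive slice to r
        have hslice : PySem.Chars.slice d (some (PySem.Chars.find d ['.'] + 1)) = r := by
          rw [PySem.Chars.slice_eq_listSlice, PySem.List.slice_from _ (by omega)]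
          congr 1
          omega
        rw [hslice]
        have hrlen : r.length ≤ n := by
          have : r.length = d.length - (k + 1) := by simp [hr]
          omega
        rw [← ih r hrlen, pvAFind_eq_find?]
        apply pvFind?_congr
        intro t ht
        have htd : t ≠ d := fun he => hdnot (he ▸ ht)
        have hiff : pvCond t d ↔ pvCond t r := by
          constructor
          · rintro (h1 | h1)
            · exact absurd h1.symm htd
            · rw [hsplit] at h1
              rcases (pv_dotSuffix_split _ _ _ hafree).mp h1 with h2 | h2
              · exact Or.inl h2.symm
              · exact Or.inr h2
          · rintro (h1 | h1)
            · exact Or.inr (by rw [hsplit]; exact (pv_dotSuffix_split _ _ _ hafree).mpr (Or.inl h1.symm))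
            · exact Or.inr (by rw [hsplit]; exact (pv_dotSuffix_split _ _ _ hafree).mpr (Or.inr h1))
        simp [hiff]

-- ===== VERDICT (by name: the statement is the Claim_ definition above) =====
theorem is_suspicious_email_spec : Claim_equal_is_suspicious_email := by
  unfold Claim_equal_is_suspicious_email
  intro email _
  unfold Spec_is_suspicious_email is_suspicious_email is_suspicious_email_alt
  by_cases h1 : email.toList = [] ∨ ¬ PySem.Str.isIn "@" email
  · simp only [h1, if_true]
  · simp only [h1, if_false]
    cases hp : PySem.Chars.splitOn (PySem.Chars.strip (PySem.Chars.lower email.toList)) "@".toList with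
    | nil => simp
    | cons l rest =>
      cases rest with
      | nil => simp
      | cons dmn rest2 =>
        cases rest2 with
        | nil =>
          rw [if_neg (by simp)]
          simp only [List.getD, List.getElem?_cons_zero, List.getElem?_cons_succ, Option.getD_some]
          rw [← pvMain dmn.length dmn (le_refl _)]
          cases hf : pvAFind pvSuspiciousDomains dmn with
          | some t => rfl
          | none =>
            simp only []
            split_ifs with hA hB <;> simp_all
        | cons x xs => simp
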